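-- pv_equiv track=rewrite | github.com/romka-best/gpts-turbo-bot | bot/helpers/getters/get_history_without_duplicates.py | get_history_without_duplicates
-- ===== SOURCE A (Python) =====
-- def get_history_without_duplicates(history: list) -> list:
--     result = []
--     first_user_found = False
--
--     for item in history:
--         if not first_user_found and item['role'] == 'user':
--             first_user_found = True
--
--         if first_user_found:
--             if result and item['role'] == result[-1]['role']:
--                 result[-1] = item
--             else:
--                 result.append(item)
--
--     return result
-- ===== SOURCE B (Python) =====
-- def get_history_without_duplicates(history: list) -> list:
--     # Phase 1: locate the suffix starting at the first 'user' message.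
--     i = 0
--     while i < len(history) and history[i]['role'] != 'user':
--         i += 1
--     # Phase 2: scan that suffix from the right, keeping the first item seen
--     # of each run of equal roles (i.e. the last item of each run in order).
--     kept = []
--     for item in reversed(history[i:]):
--         if not kept or item['role'] != kept[0]['role']:
--             kept.insert(0, item)
--     return kept
-- ===== Notes on version B (the rewrite author's own statement) =====
-- stated objective: alternative
-- what changed: Replaces A's single stateful loop (first-user flag plus overwriting result[-1]) by two phases: advance an index to the first 'user' message, then scan the suffix right-to-left keeping the first item seen of each run of equal roles.
-- outside the precondition, e.g. on get_history_without_duplicates([{'content': 'hi'}]): A raises KeyError, B raises KeyError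
import Mathlib
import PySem

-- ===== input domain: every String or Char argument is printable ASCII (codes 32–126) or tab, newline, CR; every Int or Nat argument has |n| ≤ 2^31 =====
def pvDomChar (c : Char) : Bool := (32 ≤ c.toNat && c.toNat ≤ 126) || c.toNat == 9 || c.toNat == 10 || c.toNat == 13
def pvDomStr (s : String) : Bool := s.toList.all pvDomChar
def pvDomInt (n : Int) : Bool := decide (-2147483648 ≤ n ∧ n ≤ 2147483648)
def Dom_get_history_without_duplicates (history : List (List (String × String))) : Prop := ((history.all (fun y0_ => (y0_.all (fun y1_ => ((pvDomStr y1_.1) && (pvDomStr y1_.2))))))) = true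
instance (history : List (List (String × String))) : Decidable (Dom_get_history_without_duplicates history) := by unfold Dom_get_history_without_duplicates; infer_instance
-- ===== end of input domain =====

-- B replaces A's single stateful loop by two phases (drop the prefix before the
-- first 'user', then keep the last item of each run of equal roles via a
-- right-to-left scan); objective: alternative decomposition, no speed claim.

-- ===== PORT A =====
-- item['role'] : first-match association-list lookup; Pre_ guarantees the key exists,
-- so the `getD ""` totalisation is never exercised on admitted inputs.
def pvRole (item : List (String × String)) : String :=
  (((item.find? (fun kv => kv.1 == "role")).map (·.2)).getD "")

def pvStepA (st : List (List (String × String)) × Bool) (item : List (String × String)) :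
    List (List (String × String)) × Bool :=
  let fuf := if !st.2 && (pvRole item == "user") then true else st.2
  if fuf then
    if !st.1.isEmpty && (pvRole item == pvRole (st.1.getLastD [])) then
      (st.1.dropLast ++ [item], fuf)
    else
      (st.1 ++ [item], fuf)
  else (st.1, fuf)

def get_history_without_duplicates (history : List (List (String × String))) :
    List (List (String × String)) :=
  (history.foldl pvStepA ([], false)).1

-- ===== PORT B =====
-- `reversed(...)` + prepend loop is a foldr; the index loop is a dropWhile.
def pvKeep (item : List (String × String)) (acc : List (List (String × String))) :
    List (List (String × String)) :=
  if acc.isEmpty || !(pvRole item == pvRole acc.headI) then item :: acc else acc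

def get_history_without_duplicates_alt (history : List (List (String × String))) :
    List (List (String × String)) :=
  (history.dropWhile (fun item => !(pvRole item == "user"))).foldr pvKeep []

-- ===== PRECONDITION & SPEC =====
-- Pre_ excludes exactly the inputs where some item lacks the 'role' key, on which Python A raises KeyError.
def Pre_get_history_without_duplicates (history : List (List (String × String))) : Prop :=
  (history.all (fun item => (item.find? (fun kv => kv.1 == "role")).isSome)) = true
instance (history : List (List (String × String))) : Decidable (Pre_get_history_without_duplicates history) := by unfold Pre_get_history_without_duplicates; infer_instance

def pvWitness_get_history_without_duplicates : (List (List (String × String))) :=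
  [[("role", "system"), ("content", "s")], [("role", "user"), ("content", "hi")],
   [("role", "user"), ("content", "again")], [("role", "assistant"), ("content", "ok")]]

def Spec_get_history_without_duplicates (history : List (List (String × String))) (out : List (List (String × String))) : Prop := out = get_history_without_duplicates_alt history
instance (history : List (List (String × String))) (out : List (List (String × String))) : Decidable (Spec_get_history_without_duplicates history out) := by unfold Spec_get_history_without_duplicates; infer_instance

-- ===== CLAIM (what is proved, stated in full; the proofs are below) =====
def Claim_equal_get_history_without_duplicates : Prop := ∀ (history : List (List (String × String))), Dom_get_history_without_duplicates history → Pre_get_history_without_duplicates history → Spec_get_history_without_duplicates history (get_history_without_duplicates history)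

-- ===== LEMMAS AND PROOFS =====

-- A's loop body once first_user_found is true.
def pvStepT (res : List (List (String × String))) (item : List (String × String)) :
    List (List (String × String)) :=
  if !res.isEmpty && (pvRole item == pvRole (res.getLastD [])) then
    res.dropLast ++ [item]
  else res ++ [item]

-- shorthand for B's phase-2 collapse
def pvG (l : List (List (String × String))) : List (List (String × String)) :=
  l.foldr pvKeep []

lemma pvG_cons (b : List (String × String)) (l : List (List (String × String))) :
    pvG (b :: l) = pvKeep b (pvG l) := rfl

lemma pvG_cons_ne_nil_head (x : List (String × String)) (xs : List (List (String × String))) :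
    pvG (x :: xs) ≠ [] ∧ pvRole ((pvG (x :: xs)).headI) = pvRole x := by
  rw [pvG_cons]
  unfold pvKeep
  rcases h : pvG xs with _ | ⟨y, ys⟩
  · simp
  · by_cases hr : pvRole x == pvRole y
    · simp_all
    · simp_all

lemma pvFoldT_split (l : List (List (String × String)))
    (res : List (List (String × String))) (a : List (String × String)) :
    List.foldl pvStepT (res ++ [a]) l = res ++ List.foldl pvStepT [a] l := by
  induction l generalizing res a with
  | nil => simp
  | cons x xs ih =>
    simp only [List.foldl_cons]
    by_cases hr : pvRole x == pvRole a
    · have h1 : pvStepT (res ++ [a]) x = res ++ [x] := by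
        simp [pvStepT, hr]
      have h2 : pvStepT [a] x = [x] := by simp [pvStepT, hr]
      rw [h1, h2, ih res x]
    · have h1 : pvStepT (res ++ [a]) x = (res ++ [a]) ++ [x] := by
        simp [pvStepT, hr]
      have h2 : pvStepT [a] x = [a] ++ [x] := by simp [pvStepT, hr]
      rw [h1, h2, ih (res ++ [a]) x, ih [a] x, List.append_assoc]

lemma pvFoldT_eq_pvG (a : List (String × String)) (l : List (List (String × String))) :
    List.foldl pvStepT [a] l = pvG (a :: l) := by
  induction l generalizing a with
  | nil => simp [pvG, pvKeep]
  | cons x xs ih =>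
    obtain ⟨hne, hhd⟩ := pvG_cons_ne_nil_head x xs
    by_cases hr : pvRole x == pvRole a
    · have hax : pvRole a = pvRole x := (eq_of_beq hr).symm
      have h2 : pvStepT [a] x = [x] := by simp [pvStepT, hr]
      have hkeep : pvG (a :: x :: xs) = pvG (x :: xs) := by
        rw [pvG_cons a (x :: xs)]
        unfold pvKeep
        rw [if_neg]
        simp only [Bool.or_eq_true, List.isEmpty_iff, not_or, Bool.not_eq_true']
        exact ⟨hne, by rw [hax, ← hhd]; simp⟩
      rw [List.foldl_cons, h2, ih x, hkeep]
    · have hax : pvRole a ≠ pvRole x := fun h => hr (by simp [h])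
      have h2 : pvStepT [a] x = [a] ++ [x] := by simp [pvStepT, hr]
      have hkeep : pvG (a :: x :: xs) = a :: pvG (x :: xs) := by
        rw [pvG_cons a (x :: xs)]
        unfold pvKeep
        rw [if_pos]
        simp only [Bool.or_eq_true, Bool.not_eq_true']
        right
        rw [hhd]
        simpa using hax
      rw [List.foldl_cons, h2, pvFoldT_split xs [a] x, ih x, hkeep]
      rfl

lemma pvFoldA_true (l : List (List (String × String))) (res : List (List (String × String))) :
    List.foldl pvStepA (res, true) l = (List.foldl pvStepT res l, true) := by
  induction l generalizing res with
  | nil => rfl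
  | cons x xs ih =>
    simp only [List.foldl_cons]
    have : pvStepA (res, true) x = (pvStepT res x, true) := by
      simp only [pvStepA, pvStepT]
      split <;> (simp; split <;> rfl)
    rw [this, ih]

lemma pvA_eq_pvG (history : List (List (String × String))) :
    get_history_without_duplicates history =
      pvG (history.dropWhile (fun item => !(pvRole item == "user"))) := by
  induction history with
  | nil => rfl
  | cons x xs ih =>
    by_cases hu : pvRole x == "user"
    · have hs : pvStepA ([], false) x = ([x], true) := by
        simp [pvStepA, hu]
      simp only [get_history_without_duplicates, List.foldl_cons, hs, pvFoldA_true,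
        List.dropWhile_cons, hu]
      simp [pvFoldT_eq_pvG]
    · have hs : pvStepA ([], false) x = ([], false) := by
        simp [pvStepA, hu]
      simp only [get_history_without_duplicates, List.foldl_cons, hs,
        List.dropWhile_cons, hu] at *
      simpa using ih

-- ===== VERDICT (by name: the statement is the Claim_ definition above) =====
theorem get_history_without_duplicates_spec : Claim_equal_get_history_without_duplicates := by
  intro history _ _
  unfold Spec_get_history_without_duplicates get_history_without_duplicates_alt
  rw [pvA_eq_pvG]
  rfl
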